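-- pv_equiv track=rewrite | github.com/zemuche/zmath | numbers.py | superperfect_nums
-- ===== SOURCE A (Python) =====
-- def factors(n, proper=False):
--     """
--     Generate factors of n one by one
--     :param n:
--     :param proper:
--     :return: generator object
--     """
--     limit = n + 1 if not proper else n
--     for x in range(1, limit):
--         if n % x == 0:
--             yield x
--
-- def issuperperfect(n):
--     """Return True if an integer is a super perfect number; False otherwise."""
--     return sum(factors(sum(factors(n)))) == 2 * n
--
-- def superperfect_nums(start, stop=None):
--     """Generate super perfect numbers between a range"""
--     if start < 2:
--         start = 2
--     if stop is None:
--         start, stop = 2, start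
--     for n in range(start, stop + 1):
--         if issuperperfect(n):
--             yield n
-- ===== SOURCE B (Python) =====
-- def _sigma(n):
--     """Sum of all positive divisors of n (0 for n <= 0), by trial division up to sqrt(n)."""
--     total = 0
--     d = 1
--     while d * d <= n:
--         if n % d == 0:
--             q = n // d
--             total += d if d == q else d + q
--         d += 1
--     return total
--
--
-- def superperfect_nums(start, stop=None):
--     """Generate super perfect numbers between a range"""
--     if stop is None:
--         start, stop = 2, max(start, 2)
--     else:
--         start = max(start, 2)
--     for n in range(start, stop + 1):
--         if _sigma(_sigma(n)) == 2 * n: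
--             yield n
-- ===== Notes on version B (the rewrite author's own statement) =====
-- stated objective: alternative
-- what changed: Each divisor sum is computed by trial division up to sqrt(n), adding each divisor d together with its cofactor n//d, instead of A's full scan of all candidates 1..n done twice through nested generators.
import Mathlib
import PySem

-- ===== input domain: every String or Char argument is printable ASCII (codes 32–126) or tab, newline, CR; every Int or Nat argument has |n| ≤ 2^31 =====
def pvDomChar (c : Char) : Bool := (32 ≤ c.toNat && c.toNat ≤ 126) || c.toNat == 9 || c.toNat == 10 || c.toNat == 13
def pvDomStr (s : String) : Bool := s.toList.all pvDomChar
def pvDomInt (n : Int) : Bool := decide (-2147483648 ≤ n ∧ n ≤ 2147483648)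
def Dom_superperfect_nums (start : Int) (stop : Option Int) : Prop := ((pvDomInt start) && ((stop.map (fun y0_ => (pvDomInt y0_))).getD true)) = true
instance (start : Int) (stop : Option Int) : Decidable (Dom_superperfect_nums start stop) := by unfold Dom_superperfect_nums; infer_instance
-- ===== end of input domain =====

-- B replaces A's double full scan 1..n inside each divisor sum by trial division up to sqrt(n),
-- adding each divisor together with its cofactor: a structurally different exact re-implementation.
-- Both Pythons are generators; equivalence is about the produced sequence of values (as a list).

-- ===== PORT A =====
-- factors(n, proper=False): list of x in range(1, limit) with n % x == 0
def pvFactors (n : Int) (proper : Bool) : List Int :=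
  (PySem.List.pyRange 1 (if proper then n else n + 1)).filter
    (fun x => PySem.Int.mod n x == 0)

-- issuperperfect(n)
def pvIssuperperfect (n : Int) : Bool :=
  (pvFactors (pvFactors n false).sum false).sum == 2 * n

def superperfect_nums (start : Int) (stop : Option Int) : List Int :=
  let start1 := if start < 2 then 2 else start
  let p : Int × Int :=
    match stop with
    | none => (2, start1)
    | some t => (start1, t)
  (PySem.List.pyRange p.1 (p.2 + 1)).filter (fun n => pvIssuperperfect n)

-- ===== PORT B =====
-- the 'while d * d <= n' loop of _sigma, carrying the running total
def pvSigmaLoop (n d total : Int) : Int :=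
  if h : d * d ≤ n then
    pvSigmaLoop n (d + 1)
      (if PySem.Int.mod n d == 0 then
        (let q := PySem.Int.floordiv n d
         if d == q then total + d else total + d + q)
       else total)
  else total
termination_by (n + 1 - d).toNat
decreasing_by
  have hd : d ≤ n := by nlinarith [sq_nonneg d]
  omega

-- _sigma(n)
def pvSigma (n : Int) : Int := pvSigmaLoop n 1 0

def superperfect_nums_alt (start : Int) (stop : Option Int) : List Int :=
  match stop with
  | none => (PySem.List.pyRange 2 (max start 2 + 1)).filter
      (fun n => pvSigma (pvSigma n) == 2 * n)
  | some t => (PySem.List.pyRange (max start 2) (t + 1)).filter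
      (fun n => pvSigma (pvSigma n) == 2 * n)

-- ===== PRECONDITION & SPEC =====
def Spec_superperfect_nums (start : Int) (stop : Option Int) (out : List Int) : Prop := out = superperfect_nums_alt start stop
instance (start : Int) (stop : Option Int) (out : List Int) : Decidable (Spec_superperfect_nums start stop out) := by unfold Spec_superperfect_nums; infer_instance

-- ===== CLAIM (what is proved, stated in full; the proofs are below) =====
def Claim_equal_superperfect_nums : Prop := ∀ (start : Int) (stop : Option Int), Dom_superperfect_nums start stop → Spec_superperfect_nums start stop (superperfect_nums start stop)

-- ===== LEMMAS AND PROOFS =====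

-- Nat-level form of A's divisor sum (sum over 1..N of divisors)
def pvSA (N : ℕ) : ℕ := ∑ x ∈ Finset.Ioc 0 N, if N % x = 0 then x else 0

-- Nat-level form of B's divisor sum (trial division up to sqrt, divisor + cofactor)
def pvSB (N : ℕ) : ℕ :=
  ∑ d ∈ Finset.Ioc 0 N.sqrt, if N % d = 0 then (if d = N / d then d else d + N / d) else 0

lemma pvSA_eq_divisors (N : ℕ) (hN : N ≠ 0) : pvSA N = ∑ d ∈ N.divisors, d := by
  unfold pvSA
  rw [← Finset.sum_filter]
  congr 1
  ext x
  simp only [Finset.mem_filter, Finset.mem_Ioc, Nat.mem_divisors, ← Nat.dvd_iff_mod_eq_zero]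
  constructor
  · rintro ⟨⟨_, _⟩, hx⟩; exact ⟨hx, hN⟩
  · rintro ⟨hx, _⟩
    exact ⟨⟨Nat.pos_of_dvd_of_pos hx (Nat.pos_of_ne_zero hN),
      Nat.le_of_dvd (Nat.pos_of_ne_zero hN) hx⟩, hx⟩

lemma pvSB_eq_divisors (N : ℕ) (hN : N ≠ 0) : pvSB N = ∑ d ∈ N.divisors, d := by
  unfold pvSB
  rw [← Finset.sum_filter]
  have hS : (Finset.Ioc 0 N.sqrt).filter (fun d => N % d = 0)
      = N.divisors.filter (fun d => d ≤ N.sqrt) := by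
    ext x
    simp only [Finset.mem_filter, Finset.mem_Ioc, Nat.mem_divisors, ← Nat.dvd_iff_mod_eq_zero]
    constructor
    · rintro ⟨⟨_, hxs⟩, hx⟩; exact ⟨⟨hx, hN⟩, hxs⟩
    · rintro ⟨⟨hx, _⟩, hxs⟩
      exact ⟨⟨Nat.pos_of_dvd_of_pos hx (Nat.pos_of_ne_zero hN), hxs⟩, hx⟩
  rw [hS]
  have hbody : ∀ d, (if d = N / d then d else d + N / d) = d + (if d ≠ N / d then N / d else 0) := by
    intro d; split_ifs <;> first | rfl | omega
  calc ∑ d ∈ N.divisors.filter (fun d => d ≤ N.sqrt), (if d = N / d then d else d + N / d)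
      = ∑ d ∈ N.divisors.filter (fun d => d ≤ N.sqrt), (d + if d ≠ N / d then N / d else 0) := by
        exact Finset.sum_congr rfl (fun d _ => hbody d)
    _ = ∑ d ∈ N.divisors.filter (fun d => d ≤ N.sqrt), d
        + ∑ d ∈ (N.divisors.filter (fun d => d ≤ N.sqrt)).filter (fun d => d ≠ N / d), N / d := by
        rw [Finset.sum_add_distrib, ← Finset.sum_filter]
    _ = ∑ d ∈ N.divisors.filter (fun d => d ≤ N.sqrt), d
        + ∑ d ∈ N.divisors.filter (fun d => ¬ d ≤ N.sqrt), d := by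
        congr 1
        refine Finset.sum_nbij' (fun e => N / e) (fun d => N / d) ?_ ?_ ?_ ?_ ?_
        · intro e he
          simp only [Finset.mem_filter, Nat.mem_divisors] at he ⊢
          obtain ⟨⟨⟨hdvd, _⟩, hle⟩, hne⟩ := he
          have hepos : 0 < e := Nat.pos_of_dvd_of_pos hdvd (Nat.pos_of_ne_zero hN)
          have hke : N / e * e = N := Nat.div_mul_cancel hdvd
          have hlt : e < N / e := by
            rcases lt_or_ge e (N / e) with h | h
            · exact h
            · exfalso
              have h1 : N ≤ e * e := by nlinarith
              have h2 : e * e ≤ N := le_trans (Nat.mul_le_mul hle hle) (Nat.sqrt_le N)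
              have h3 : N / e = e := by nlinarith
              exact hne h3.symm
          refine ⟨⟨Nat.div_dvd_of_dvd hdvd, hN⟩, ?_⟩
          rw [not_le, Nat.lt_iff_add_one_le, ← Nat.lt_iff_add_one_le]
          exact Nat.sqrt_lt.mpr (by nlinarith)
        · intro d hd
          simp only [Finset.mem_filter, Nat.mem_divisors] at hd ⊢
          obtain ⟨⟨hdvd, _⟩, hgt⟩ := hd
          rw [not_le] at hgt
          have hdpos : 0 < d := Nat.pos_of_dvd_of_pos hdvd (Nat.pos_of_ne_zero hN)
          have hle : N / d ≤ N.sqrt := by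
            have h1 : N / d ≤ N / (N.sqrt + 1) := Nat.div_le_div_left hgt (Nat.succ_pos _)
            have h2 : N / (N.sqrt + 1) < N.sqrt + 1 :=
              (Nat.div_lt_iff_lt_mul (Nat.succ_pos _)).mpr (Nat.lt_succ_sqrt N)
            omega
          refine ⟨⟨⟨Nat.div_dvd_of_dvd hdvd, hN⟩, hle⟩, ?_⟩
          rw [Nat.div_div_self hdvd hN]
          intro heq
          have : d * d = N := by
            have := Nat.div_mul_cancel hdvd
            nlinarith
          have : N.sqrt < d := hgt
          have : N < d * d := Nat.sqrt_lt.mp hgt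
          omega
        · intro e he
          simp only [Finset.mem_filter, Nat.mem_divisors] at he
          exact Nat.div_div_self he.1.1.1 hN
        · intro d hd
          simp only [Finset.mem_filter, Nat.mem_divisors] at hd
          exact Nat.div_div_self hd.1.1 hN
        · intro e _; rfl
    _ = ∑ d ∈ N.divisors, d := Finset.sum_filter_add_sum_filter_not _ _ _

lemma pvSA_eq_pvSB (N : ℕ) : pvSA N = pvSB N := by
  rcases Nat.eq_zero_or_pos N with h | h
  · subst h; rfl
  · rw [pvSA_eq_divisors N (by omega), pvSB_eq_divisors N (by omega)]

lemma pvFactors_sum_aux (N : ℕ) (M : ℕ) :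
    ((PySem.List.pyRange 1 ((M : ℤ) + 1)).filter (fun x => PySem.Int.mod (N : ℤ) x == 0)).sum
      = ((∑ x ∈ Finset.Ioc 0 M, if N % x = 0 then x else 0 : ℕ) : Int) := by
  induction M with
  | zero => simp [PySem.List.pyRange_one_eq_nil (by omega : (1:ℤ) ≤ 1)]
  | succ M ih =>
    have hstep : PySem.List.pyRange 1 ((M : ℤ) + 1 + 1)
        = PySem.List.pyRange 1 ((M : ℤ) + 1) ++ [(M : ℤ) + 1] := by
      exact PySem.List.pyRange_one_succ_right (by omega)
    have hcast : ((M + 1 : ℕ) : ℤ) + 1 = (M : ℤ) + 1 + 1 := by push_cast; ring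
    rw [hcast, hstep, List.filter_append, List.sum_append, ih,
      Finset.sum_Ioc_succ_top (Nat.zero_le M)]
    have hmod : PySem.Int.mod (N : ℤ) ((M : ℤ) + 1) = ((N % (M + 1) : ℕ) : ℤ) := by
      have : ((M : ℤ) + 1) = ((M + 1 : ℕ) : ℤ) := by push_cast; ring
      rw [this, PySem.Int.mod_natCast]
    by_cases h : N % (M + 1) = 0
    · have hb : (PySem.Int.mod (N : ℤ) ((M : ℤ) + 1) == 0) = true := by
        rw [hmod, h]; rfl
      simp only [List.filter_cons, List.filter_nil, hb, List.sum_cons, List.sum_nil, h, if_pos]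
      push_cast
      ring
    · have hb : (PySem.Int.mod (N : ℤ) ((M : ℤ) + 1) == 0) = false := by
        rw [hmod]
        exact beq_eq_false_iff_ne.mpr (fun hc => h (by exact_mod_cast hc))
      simp only [List.filter_cons, List.filter_nil, hb, Bool.false_eq_true, if_false,
        List.sum_nil, if_neg h]
      push_cast
      ring
lemma pvFactors_sum_eq (n : Int) : (pvFactors n false).sum = (pvSA n.toNat : Int) := by
  unfold pvFactors pvSA
  rcases le_or_gt n 0 with h | h
  · rw [PySem.List.pyRange_one_eq_nil (by omega)]
    have : n.toNat = 0 := by omega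
    simp [this]
  · have hn : n = ((n.toNat : ℕ) : ℤ) := by omega
    rw [hn]
    exact pvFactors_sum_aux n.toNat n.toNat

lemma pvSigmaLoop_eq (n : Int) (hn : 0 ≤ n) : ∀ k : ℕ, ∀ d t : Int, 1 ≤ d → (n + 1 - d).toNat = k →
    pvSigmaLoop n d t =
      t + ((∑ e ∈ Finset.Icc d.toNat n.toNat.sqrt,
        if n.toNat % e = 0 then (if e = n.toNat / e then e else e + n.toNat / e) else 0 : ℕ) : Int) := by
  intro k
  induction k using Nat.strong_induction_on with
  | _ k ih =>
    intro d t hd hk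
    obtain ⟨N, rfl⟩ := Int.eq_ofNat_of_zero_le hn
    obtain ⟨D, rfl⟩ := Int.eq_ofNat_of_zero_le (by omega : (0:ℤ) ≤ d)
    have hD : 1 ≤ D := by exact_mod_cast hd
    by_cases h : (D : ℤ) * D ≤ (N : ℤ)
    · have hDD : D * D ≤ N := by exact_mod_cast h
      have hDs : D ≤ N.sqrt := Nat.le_sqrt.mpr hDD
      rw [pvSigmaLoop, dif_pos h]
      have hDN : D ≤ N := by nlinarith
      have hrec := ih ((N : ℤ) + 1 - ((D : ℤ) + 1)).toNat (by omega) ((D : ℤ) + 1)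
        (if PySem.Int.mod (N : ℤ) (D : ℤ) == 0 then
          (let q := PySem.Int.floordiv (N : ℤ) (D : ℤ)
           if ((D : ℤ) == q) then t + (D : ℤ) else t + (D : ℤ) + q)
         else t) (by omega) rfl
      have hcast : ((D : ℤ) + 1) = ((D + 1 : ℕ) : ℤ) := by push_cast; ring
      rw [hcast]
      refine Eq.trans hrec ?_
      have htn : ((D : ℤ) + 1).toNat = D + 1 := by omega
      simp only [htn, Int.toNat_natCast]
      have hsplit : Finset.Icc D N.sqrt = insert D (Finset.Icc (D + 1) N.sqrt) := by
        rw [Finset.Icc_add_one_left_eq_Ioc D N.sqrt]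
        exact (Finset.Ioc_insert_left hDs).symm
      rw [hsplit, Finset.sum_insert (by simp)]
      rw [PySem.Int.mod_natCast, PySem.Int.floordiv_natCast]
      by_cases hm : N % D = 0
      · have hb1 : (((N % D : ℕ) : ℤ) == 0) = true := by rw [hm]; rfl
        by_cases hq : D = N / D
        · rw [← hq]
          simp only [hb1, if_true, beq_self_eq_true]
          push_cast
          rw [if_pos hm]
          ring
        · have hb2 : ((D : ℤ) == ((N / D : ℕ) : ℤ)) = false :=
            beq_eq_false_iff_ne.mpr (fun hc => hq (by exact_mod_cast hc))
          simp only [hb1, if_true, hb2, Bool.false_eq_true, if_false, if_pos hm, if_neg hq]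
          push_cast
          ring
      · have hb1 : (((N % D : ℕ) : ℤ) == 0) = false :=
          beq_eq_false_iff_ne.mpr (fun hc => hm (by exact_mod_cast hc))
        simp only [hb1, Bool.false_eq_true, if_false, if_neg hm]
        push_cast
        ring
    · rw [pvSigmaLoop, dif_neg h]
      have hDD : ¬ D * D ≤ N := by exact_mod_cast h
      have hlt : N.sqrt < D := by
        rcases Nat.lt_or_ge N.sqrt D with h1 | h1
        · exact h1
        · exact absurd (Nat.le_sqrt.mp h1) hDD
      simp only [Int.toNat_natCast]
      rw [Finset.Icc_eq_empty (by omega)]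
      simp

lemma pvSigma_eq (n : Int) : (pvFactors n false).sum = pvSigma n := by
  rw [pvFactors_sum_eq]
  unfold pvSigma
  by_cases h : 0 ≤ n
  · rw [pvSigmaLoop_eq n h (n + 1 - 1).toNat 1 0 (le_refl 1) rfl]
    rw [pvSA_eq_pvSB]
    unfold pvSB
    rw [show ((1:ℤ)).toNat = 1 from rfl,
      show Finset.Icc 1 n.toNat.sqrt = Finset.Ioc 0 n.toNat.sqrt from
        Finset.Icc_add_one_left_eq_Ioc 0 n.toNat.sqrt]
    ring
  · rw [pvSigmaLoop, dif_neg (by simp; omega)]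
    have hto : n.toNat = 0 := by omega
    simp [hto, pvSA]

lemma pvIssuperperfect_eq (n : Int) : pvIssuperperfect n = (pvSigma (pvSigma n) == 2 * n) := by
  unfold pvIssuperperfect
  rw [pvSigma_eq n, pvSigma_eq (pvSigma n)]

-- ===== VERDICT (by name: the statement is the Claim_ definition above) =====
theorem superperfect_nums_spec : Claim_equal_superperfect_nums := by
  intro start stop _
  unfold Spec_superperfect_nums superperfect_nums superperfect_nums_alt
  have hmax : (if start < 2 then 2 else start) = max start 2 := by
    split <;> omega
  cases stop <;>
    simp only [hmax] <;>
    exact List.filter_congr (fun x _ => pvIssuperperfect_eq x)
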